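-- pv_equiv track=rewrite | github.com/ThomasLEBRET/Programmation_-tudes-sup | BTS-SIO/algorithme/1ère année/TP6-Matrices/exercice9.py | cadre
-- ===== SOURCE A (Python) =====
-- def matnull(n):
--     mat = []
--     for i in range(0,n):
--         mat.append([])
--         for j in range(0,n):
--             mat[i].append(0)
--     return mat
--
-- def cadre(n):
--     mat = matnull(n)
--     for i in range(len(mat)):
--         mat[0][i] = 1
--         mat[i][0] = 1
--         mat[i][len(mat)-1] = 1
--         mat[len(mat)-1][i] = 1
--     return mat
-- ===== SOURCE B (Python) =====
-- def cadre(n):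
--     mat = []
--     for i in range(0, n):
--         row = []
--         for j in range(0, n):
--             if i == 0 or j == 0 or i == n - 1 or j == n - 1:
--                 row.append(1)
--             else:
--                 row.append(0)
--         mat.append(row)
--     return mat
-- ===== Notes on version B (the rewrite author's own statement) =====
-- stated objective: simpler
-- what changed: B builds each row in one decide-per-cell pass (append 1 on the border test, else 0) instead of A's two-phase allocate-a-zero-matrix-then-overwrite-the-border-by-index-assignment.
import Mathlib
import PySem

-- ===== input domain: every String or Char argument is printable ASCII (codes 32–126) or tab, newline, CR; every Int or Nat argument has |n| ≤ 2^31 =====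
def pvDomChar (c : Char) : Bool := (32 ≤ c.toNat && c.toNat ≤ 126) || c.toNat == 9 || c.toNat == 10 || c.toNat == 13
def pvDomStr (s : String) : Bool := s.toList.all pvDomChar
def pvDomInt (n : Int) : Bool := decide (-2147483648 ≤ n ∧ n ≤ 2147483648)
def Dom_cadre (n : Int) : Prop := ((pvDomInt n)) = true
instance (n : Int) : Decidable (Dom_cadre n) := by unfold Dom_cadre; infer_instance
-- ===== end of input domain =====

-- B builds each row in one decide-per-cell pass instead of A's allocate-zeros-then-overwrite-border
-- two-phase approach; same O(n^2) cost, simpler decomposition.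


-- ===== PORT A =====
-- mat[r][c] = v; every index the Python reaches is in range, where List.set/getD are exact.
def pySetCell (m : List (List Int)) (r c : Nat) (v : Int) : List (List Int) :=
  m.set r ((m.getD r []).set c v)

def matnull (n : Int) : List (List Int) :=
  (PySem.List.pyRange 0 n 1).foldl (fun mat i =>
    (PySem.List.pyRange 0 n 1).foldl
      (fun m _j => m.set i.toNat ((m.getD i.toNat []) ++ [0]))   -- mat[i].append(0)
      (mat ++ [[]]))                                             -- mat.append([])
    []

def cadre (n : Int) : List (List Int) :=
  let mat := matnull n
  (PySem.List.pyRange 0 (mat.length : Int) 1).foldl (fun m i =>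
    let m := pySetCell m 0 i.toNat 1
    let m := pySetCell m i.toNat 0 1
    let m := pySetCell m i.toNat (m.length - 1) 1
    let m := pySetCell m (m.length - 1) i.toNat 1
    m) mat

-- ===== PORT B =====
def cadre_alt (n : Int) : List (List Int) :=
  (PySem.List.pyRange 0 n 1).foldl (fun mat i =>
    let row := (PySem.List.pyRange 0 n 1).foldl (fun row j =>
      if i = 0 ∨ j = 0 ∨ i = n - 1 ∨ j = n - 1 then row ++ [1] else row ++ [0])
      ([] : List Int)
    mat ++ [row]) []

-- ===== PRECONDITION & SPEC =====
def Spec_cadre (n : Int) (out : List (List Int)) : Prop := out = cadre_alt n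
instance (n : Int) (out : List (List Int)) : Decidable (Spec_cadre n out) := by unfold Spec_cadre; infer_instance

-- ===== CLAIM (what is proved, stated in full; the proofs are below) =====
def Claim_equal_cadre : Prop := ∀ (n : Int), Dom_cadre n → Spec_cadre n (cadre n)

-- ===== LEMMAS AND PROOFS =====

-- the matrix after k iterations of A's border loop, in closed form
def pvM (N k : Nat) : List (List Int) :=
  (List.range N).map (fun i => (List.range N).map (fun j =>
    if (i = 0 ∧ j < k) ∨ (j = 0 ∧ i < k) ∨ (j = N - 1 ∧ i < k) ∨ (i = N - 1 ∧ j < k)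
    then 1 else 0))

theorem pvM_length (N k : Nat) : (pvM N k).length = N := by simp [pvM]

theorem pvRange_toNat (n : Int) :
    PySem.List.pyRange 0 n 1 = List.map (fun k : Nat => (k : Int)) (List.range n.toNat) := by
  by_cases h : n ≤ 0
  · rw [PySem.List.pyRange_of_pos 0 n Int.one_pos, if_neg (by omega),
      show n.toNat = 0 by omega]
    simp
  · have hN : n = ((n.toNat : Nat) : Int) := by omega
    conv_lhs => rw [hN]
    rw [PySem.List.pyRange_zero_natCast]

theorem map_range_set {α : Type} (N r : Nat) (f : Nat → α) (x : α) :
    ((List.range N).map f).set r x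
      = (List.range N).map (fun i => if i = r then x else f i) := by
  apply List.ext_getElem
  · simp
  · intro i h1 h2
    simp only [List.getElem_map, List.getElem_range] at *
    by_cases hir : i = r
    · subst hir; simp_all
    · rw [List.getElem_set_ne (by omega)]; simp [hir]

theorem pySetCell_M (N r c : Nat) (hr : r < N) (hc : c < N)
    (P : Nat → Nat → Prop) [∀ i j, Decidable (P i j)] :
    pySetCell ((List.range N).map (fun i => (List.range N).map (fun j =>
        if P i j then (1:Int) else 0))) r c 1
      = (List.range N).map (fun i => (List.range N).map (fun j =>
        if (i = r ∧ j = c) ∨ P i j then (1:Int) else 0)) := by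
  unfold pySetCell
  rw [PySem.List.getD_map_range _ _ _ _ hr, map_range_set, map_range_set]
  apply List.map_congr_left
  intro i hi
  by_cases hir : i = r
  · subst hir
    rw [if_pos rfl]
    apply List.map_congr_left
    intro j hj
    by_cases hjc : j = c
    · subst hjc; simp
    · simp [hjc]
  · simp [hir]

theorem cadre_step (N k : Nat) (hk : k < N) :
    (let m1 := pySetCell (pvM N k) 0 k 1
     let m2 := pySetCell m1 k 0 1
     let m3 := pySetCell m2 k (m2.length - 1) 1
     pySetCell m3 (m3.length - 1) k 1) = pvM N (k + 1) := by
  have hN : 0 < N := lt_of_le_of_lt (Nat.zero_le k) hk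
  have hN1 : N - 1 < N := Nat.sub_lt hN Nat.one_pos
  simp only []
  unfold pvM
  rw [pySetCell_M N 0 k hN hk
      (P := fun i j => (i = 0 ∧ j < k) ∨ (j = 0 ∧ i < k) ∨ (j = N - 1 ∧ i < k) ∨ (i = N - 1 ∧ j < k))]
  rw [pySetCell_M N k 0 hk hN
      (P := fun i j => (i = 0 ∧ j = k) ∨ (i = 0 ∧ j < k) ∨ (j = 0 ∧ i < k) ∨ (j = N - 1 ∧ i < k) ∨ (i = N - 1 ∧ j < k))]
  simp only [List.length_map, List.length_range]
  rw [pySetCell_M N k (N - 1) hk hN1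
      (P := fun i j => (i = k ∧ j = 0) ∨ (i = 0 ∧ j = k) ∨ (i = 0 ∧ j < k) ∨ (j = 0 ∧ i < k) ∨ (j = N - 1 ∧ i < k) ∨ (i = N - 1 ∧ j < k))]
  simp only [List.length_map, List.length_range]
  rw [pySetCell_M N (N - 1) k hN1 hk
      (P := fun i j => (i = k ∧ j = N - 1) ∨ (i = k ∧ j = 0) ∨ (i = 0 ∧ j = k) ∨ (i = 0 ∧ j < k) ∨ (j = 0 ∧ i < k) ∨ (j = N - 1 ∧ i < k) ∨ (i = N - 1 ∧ j < k))]
  apply List.map_congr_left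
  intro i hi
  apply List.map_congr_left
  intro j hj
  simp only [List.mem_range] at hi hj
  have hiff : ((i = N - 1 ∧ j = k) ∨ (i = k ∧ j = N - 1) ∨ (i = k ∧ j = 0) ∨ (i = 0 ∧ j = k) ∨
        (i = 0 ∧ j < k) ∨ (j = 0 ∧ i < k) ∨ (j = N - 1 ∧ i < k) ∨ (i = N - 1 ∧ j < k))
      ↔ ((i = 0 ∧ j < k + 1) ∨ (j = 0 ∧ i < k + 1) ∨ (j = N - 1 ∧ i < k + 1) ∨ (i = N - 1 ∧ j < k + 1)) := by
    omega
  rw [if_congr hiff rfl rfl]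

theorem inner_fold {α : Type} (L : List α) (prev : List (List Int)) (row : List Int)
    (i : Nat) (hi : i = prev.length) :
    L.foldl (fun m _ => m.set i ((m.getD i []) ++ [0])) (prev ++ [row])
      = prev ++ [row ++ List.replicate L.length (0:Int)] := by
  subst hi
  induction L generalizing row with
  | nil => simp
  | cons a t ih =>
      simp only [List.foldl_cons]
      have h1 : (prev ++ [row]).getD prev.length [] = row := by simp
      have h2 : (prev ++ [row]).set prev.length (row ++ [0]) = prev ++ [row ++ [0]] := by simp
      rw [h1, h2, ih]
      simp [List.replicate_succ, List.append_assoc]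

theorem matnull_inv (N : Nat) (k : Nat) :
    (List.range k).foldl (fun mat i =>
        ((List.map (fun j : Nat => (j : Int)) (List.range N)).foldl
          (fun m _ => m.set i ((m.getD i []) ++ [0])) (mat ++ [[]])))
      [] = List.replicate k (List.replicate N (0:Int)) := by
  induction k with
  | zero => simp
  | succ k ih =>
      rw [List.range_succ, List.foldl_append, ih, List.foldl_cons, List.foldl_nil]
      rw [inner_fold _ _ _ k (by simp)]
      simp [List.replicate_succ']

theorem matnull_eq (n : Int) : matnull n = pvM n.toNat 0 := by
  unfold matnull
  rw [pvRange_toNat, List.foldl_map]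
  simp only [Int.toNat_natCast]
  rw [matnull_inv n.toNat n.toNat]
  unfold pvM
  simp [List.map_const']

theorem cadre_inv (N : Nat) (k : Nat) (hk : k ≤ N) :
    (List.range k).foldl (fun m i =>
      let m1 := pySetCell m 0 i 1
      let m2 := pySetCell m1 i 0 1
      let m3 := pySetCell m2 i (m2.length - 1) 1
      pySetCell m3 (m3.length - 1) i 1) (pvM N 0)
    = pvM N k := by
  induction k with
  | zero => simp
  | succ k ih =>
      rw [List.range_succ, List.foldl_append, ih (by omega), List.foldl_cons, List.foldl_nil]
      exact cadre_step N k (by omega)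

theorem cadre_eq (n : Int) : cadre n = pvM n.toNat n.toNat := by
  unfold cadre
  simp only [matnull_eq, pvM_length]
  rw [show ((n.toNat : Nat) : Int) = ((n.toNat : Nat) : Int) from rfl,
    PySem.List.pyRange_zero_natCast, List.foldl_map]
  simp only [Int.toNat_natCast]
  exact cadre_inv n.toNat n.toNat le_rfl

theorem cadre_alt_eq (n : Int) : cadre_alt n = pvM n.toNat n.toNat := by
  unfold cadre_alt
  rw [pvRange_toNat]
  simp only [List.foldl_map]
  rw [PySem.List.foldl_append_singleton_eq_map]
  unfold pvM
  simp only [List.nil_append]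
  apply List.map_congr_left
  intro i hi
  rw [show (fun (row : List Int) (j : Nat) =>
        if (i:Int) = 0 ∨ (j:Int) = 0 ∨ (i:Int) = n - 1 ∨ (j:Int) = n - 1
        then row ++ [(1:Int)] else row ++ [0])
      = (fun (row : List Int) (j : Nat) => row ++ [if (i:Int) = 0 ∨ (j:Int) = 0 ∨ (i:Int) = n - 1 ∨ (j:Int) = n - 1
        then (1:Int) else 0]) from funext fun row => funext fun j => by split_ifs <;> rfl]
  rw [PySem.List.foldl_append_singleton_eq_map]
  simp only [List.nil_append]
  apply List.map_congr_left
  intro j hj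
  simp only [List.mem_range] at hi hj
  have hiff : ((i:Int) = 0 ∨ (j:Int) = 0 ∨ (i:Int) = n - 1 ∨ (j:Int) = n - 1)
      ↔ ((i = 0 ∧ j < n.toNat) ∨ (j = 0 ∧ i < n.toNat) ∨ (j = n.toNat - 1 ∧ i < n.toNat)
          ∨ (i = n.toNat - 1 ∧ j < n.toNat)) := by
    omega
  rw [if_congr hiff rfl rfl]

-- ===== VERDICT (by name: the statement is the Claim_ definition above) =====
theorem cadre_spec : Claim_equal_cadre := by
  intro n _
  unfold Spec_cadre
  rw [cadre_eq, cadre_alt_eq]
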